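-- pv_equiv track=rewrite | github.com/ArneBab/peersim-generic-DHT-analysis | analysis/lib/actions/sender_set_calculator.py | _get_adversaries
-- ===== SOURCE A (Python) =====
-- def _get_adversaries(data_obj):
--     adversaries = []
--     previous_node = None
--     for node in data_obj['routing_path']['path']:
--         if node['is_adversary']:
--             if previous_node is None:
--                 raise Exception(
--                     'adversary cannot be the source node: %s', str(node))
--             adversaries.append((node, previous_node))
--         previous_node = node
--     return adversaries
-- ===== SOURCE B (Python) =====
-- def _get_adversaries(data_obj):
--     path = data_obj['routing_path']['path']
--     adv_idx = [i for i, node in enumerate(path) if node['is_adversary']]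
--     if adv_idx and adv_idx[0] == 0:
--         raise Exception(
--             'adversary cannot be the source node: %s', str(path[0]))
--     return [(path[i], path[i - 1]) for i in adv_idx]
-- ===== Notes on version B (the rewrite author's own statement) =====
-- stated objective: alternative
-- what changed: Replaces A's single stateful pass carrying previous_node with a staged index-based algorithm: first collect the indices of adversary nodes via enumerate, then rebuild each pair by random access path[i], path[i-1]; the source check becomes a test on the first collected index.
import Mathlib
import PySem

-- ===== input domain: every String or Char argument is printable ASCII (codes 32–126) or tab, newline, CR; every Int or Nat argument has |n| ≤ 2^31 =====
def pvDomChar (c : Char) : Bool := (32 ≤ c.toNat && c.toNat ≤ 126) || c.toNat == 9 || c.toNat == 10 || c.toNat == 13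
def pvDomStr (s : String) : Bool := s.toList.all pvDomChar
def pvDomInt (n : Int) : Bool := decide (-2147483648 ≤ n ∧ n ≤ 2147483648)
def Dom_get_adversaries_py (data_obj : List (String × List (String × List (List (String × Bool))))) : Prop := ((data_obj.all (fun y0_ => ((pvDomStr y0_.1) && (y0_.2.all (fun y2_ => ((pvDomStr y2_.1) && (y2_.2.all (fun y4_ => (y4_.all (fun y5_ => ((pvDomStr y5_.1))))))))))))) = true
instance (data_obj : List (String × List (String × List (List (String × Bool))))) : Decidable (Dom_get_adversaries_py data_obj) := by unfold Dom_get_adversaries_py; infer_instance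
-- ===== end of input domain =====

-- One line: B is a staged index-based algorithm — first collect the indices of adversary
-- nodes, then rebuild the pairs by random access path[i], path[i-1] — instead of A's
-- single stateful pass carrying previous_node; same cost, alternative decomposition.

-- ===== PORT A =====
-- A's loop: state is (adversaries, previous_node : Option node); the 'raise' branch
-- (adversary with previous_node = none) is excluded by Pre_, where the port appends nothing.
def get_adversaries_py (data_obj : List (String × List (String × List (List (String × Bool))))) : List ((List (String × Bool)) × (List (String × Bool))) :=
  let path := (PySem.Dict.mk (PySem.Dict.mk data_obj |>.getD "routing_path" []) |>.getD "path" [])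
  (path.foldl
    (fun st node =>
      if PySem.Dict.getD (PySem.Dict.mk node) "is_adversary" false then
        match st.2 with
        | none => (st.1, some node)          -- Python raises here; outside Pre_
        | some prev => (st.1 ++ [(node, prev)], some node)
      else (st.1, some node))
    ([], none)).1

-- ===== PORT B =====
-- Source B: adv_idx via enumerate+filter, then [(path[i], path[i-1]) for i in adv_idx].
-- Inside Pre_ every i in adv_idx satisfies 1 ≤ i < len(path), so pyGetD is exact there
-- (the 'adv_idx[0] == 0' raise of Source B lies outside Pre_, like A's raise).
def get_adversaries_py_alt (data_obj : List (String × List (String × List (List (String × Bool))))) : List ((List (String × Bool)) × (List (String × Bool))) :=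
  let path := (PySem.Dict.mk (PySem.Dict.mk data_obj |>.getD "routing_path" []) |>.getD "path" [])
  let adv_idx := ((PySem.List.enumerate path).filter
      (fun p => PySem.Dict.getD (PySem.Dict.mk p.2) "is_adversary" false)).map (·.1)
  adv_idx.map (fun i => (PySem.List.pyGetD path i [], PySem.List.pyGetD path (i - 1) []))

-- ===== PRECONDITION & SPEC =====
-- Pre_ excludes exactly the inputs on which the Python A raises: a missing
-- 'routing_path'/'path'/'is_adversary' key (KeyError) or a path whose first node is an
-- adversary (A's explicit raise); the Python B raises on the very same inputs.
def Pre_get_adversaries_py (data_obj : List (String × List (String × List (List (String × Bool))))) : Prop :=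
  ((PySem.Dict.mk data_obj |>.get? "routing_path").isSome
    && (PySem.Dict.mk (PySem.Dict.mk data_obj |>.getD "routing_path" []) |>.get? "path").isSome
    && (let path := (PySem.Dict.mk (PySem.Dict.mk data_obj |>.getD "routing_path" []) |>.getD "path" []);
        path.all (fun n => (PySem.Dict.mk n |>.get? "is_adversary").isSome)
        && path.head?.all (fun h => !(PySem.Dict.getD (PySem.Dict.mk h) "is_adversary" false)))) = true
instance (data_obj : List (String × List (String × List (List (String × Bool))))) : Decidable (Pre_get_adversaries_py data_obj) := by unfold Pre_get_adversaries_py; infer_instance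
def pvWitness_get_adversaries_py : (List (String × List (String × List (List (String × Bool))))) :=
  [("routing_path", [("path", [[("is_adversary", false)], [("is_adversary", true)], [("is_adversary", false)]])])]
def Spec_get_adversaries_py (data_obj : List (String × List (String × List (List (String × Bool))))) (out : List ((List (String × Bool)) × (List (String × Bool)))) : Prop := out = get_adversaries_py_alt data_obj
instance (data_obj : List (String × List (String × List (List (String × Bool))))) (out : List ((List (String × Bool)) × (List (String × Bool)))) : Decidable (Spec_get_adversaries_py data_obj out) := by unfold Spec_get_adversaries_py; infer_instance

-- ===== CLAIM (what is proved, stated in full; the proofs are below) =====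
def Claim_equal_get_adversaries_py : Prop := ∀ (data_obj : List (String × List (String × List (List (String × Bool))))), Dom_get_adversaries_py data_obj → Pre_get_adversaries_py data_obj → Spec_get_adversaries_py data_obj (get_adversaries_py data_obj)

-- ===== LEMMAS AND PROOFS =====

-- adversary test on a node
def pvAdv (n : List (String × Bool)) : Bool := PySem.Dict.getD (PySem.Dict.mk n) "is_adversary" false

-- A's loop body
def pvF (st : List ((List (String × Bool)) × (List (String × Bool))) × Option (List (String × Bool)))
    (node : List (String × Bool)) :
    List ((List (String × Bool)) × (List (String × Bool))) × Option (List (String × Bool)) :=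
  if pvAdv node then
    match st.2 with
    | none => (st.1, some node)
    | some prev => (st.1 ++ [(node, prev)], some node)
  else (st.1, some node)

-- B's second stage applied to one index, over the full path
def pvG (full : List (List (String × Bool))) (i : Int) :
    (List (String × Bool)) × (List (String × Bool)) :=
  (PySem.List.pyGetD full i [], PySem.List.pyGetD full (i - 1) [])

-- Core loop invariant: folding A's body over the suffix l, with previous_node the last
-- element of the nonempty prefix pre, yields acc ++ B's pairs for indices enumerated
-- from pre.length into the fixed full list pre ++ l.
lemma pvKey (l : List (List (String × Bool))) :
    ∀ (pre : List (List (String × Bool))) (hpre : pre ≠ [])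
      (acc : List ((List (String × Bool)) × (List (String × Bool)))),
    (l.foldl pvF (acc, some (pre.getLast hpre))).1
      = acc ++ (((PySem.List.enumerate l (pre.length : Int)).filter
            (fun p => pvAdv p.2)).map (·.1)).map (pvG (pre ++ l)) := by
  induction l with
  | nil => intro pre hpre acc; simp [PySem.List.enumerate]
  | cons h t ih =>
    intro pre hpre acc
    have hfull : pre ++ [h] ++ t = pre ++ h :: t := by simp
    have hlast : (pre ++ [h]).getLast (by simp) = h := by simp
    have hlen : ((pre ++ [h]).length : Int) = (pre.length : Int) + 1 := by simp
    have hpos : 1 ≤ pre.length := List.length_pos_of_ne_nil hpre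
    have hg : pvG (pre ++ h :: t) (pre.length : Int) = (h, pre.getLast hpre) := by
      unfold pvG
      rw [Prod.mk.injEq]
      constructor
      · rw [show ((pre.length : Int)) = ((pre.length : Nat) : Int) from rfl,
          PySem.List.pyGetD_natCast, List.getD_append_right _ _ _ _ (le_refl _)]
        simp
      · have h1 : ((pre.length : Int) - 1) = ((pre.length - 1 : Nat) : Int) := by omega
        rw [h1, PySem.List.pyGetD_natCast]
        have hlt : pre.length - 1 < pre.length := by omega
        rw [List.getD_append _ _ _ _ hlt]
        simp [List.getD, List.getElem?_eq_getElem hlt, List.getLast_eq_getElem]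
    by_cases hadv : pvAdv h = true
    · have hstep : (( (h :: t)).foldl pvF (acc, some (pre.getLast hpre)))
          = t.foldl pvF (acc ++ [(h, pre.getLast hpre)], some h) := by
        simp [List.foldl, pvF, hadv]
      rw [hstep]
      have := ih (pre ++ [h]) (by simp) (acc ++ [(h, pre.getLast hpre)])
      rw [hlast, hlen, hfull] at this
      rw [this, PySem.List.enumerate_cons]
      simp only [List.filter_cons, hadv, if_pos, List.map_cons, hg]
      simp
    · have hstep : (( (h :: t)).foldl pvF (acc, some (pre.getLast hpre)))
          = t.foldl pvF (acc, some h) := by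
        simp [List.foldl, pvF, hadv]
      rw [hstep]
      have := ih (pre ++ [h]) (by simp) acc
      rw [hlast, hlen, hfull] at this
      rw [this, PySem.List.enumerate_cons]
      simp [hadv]

-- ===== VERDICT (by name: the statement is the Claim_ definition above) =====
theorem get_adversaries_py_spec : Claim_equal_get_adversaries_py := by
  intro data_obj _ hpre
  unfold Spec_get_adversaries_py get_adversaries_py get_adversaries_py_alt
  unfold Pre_get_adversaries_py at hpre
  simp only [Bool.and_eq_true] at hpre
  obtain ⟨⟨-, -⟩, -, hhead⟩ := hpre
  set path := (PySem.Dict.mk (PySem.Dict.mk data_obj |>.getD "routing_path" []) |>.getD "path" []) with hp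
  clear_value path
  cases path with
  | nil => rfl
  | cons h t =>
    rw [List.head?_cons, Option.all_some, Bool.not_eq_true'] at hhead
    have hfold : ((h :: t).foldl pvF ([], none)).1
        = (t.foldl pvF ([], some h)).1 := by
      simp [List.foldl, pvF]
    have hkey := pvKey t [h] (by simp) []
    simp only [List.getLast_singleton, List.length_cons, List.length_nil,
      List.singleton_append] at hkey
    show ((h :: t).foldl pvF ([], none)).1 = _
    rw [hfold, hkey]
    show _ = ((((PySem.List.enumerate (h :: t) 0).filter (fun p => pvAdv p.2)).map (·.1)).map
        (fun i => (PySem.List.pyGetD (h :: t) i [], PySem.List.pyGetD (h :: t) (i - 1) [])))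
    rw [PySem.List.enumerate_cons, List.filter_cons]
    simp [pvAdv, pvG, hhead]
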